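-- pv_equiv track=rewrite | github.com/joilsonsr/simulador_roleta_com_grafico | simulador_rodadas_com_graficos.py | calcular_repeticoes_antigas
-- ===== SOURCE A (Python) =====
-- def calcular_repeticoes_antigas(resultados, limite_tempo=5):
--     """
--     Calcula o número de repetições antigas para cada coluna.
--
--     Parâmetros:
--     - resultados: Lista de tuplas no formato [[numero, cor], ...].
--     - limite_tempo: Número de sorteios atrás para considerar uma repetição como "antiga".
--
--     Retorna:
--     - Um dicionário com o número de repetições antigas para cada coluna.
--     """
--     # Mapeamento dos números para as colunas
--     colunas = {
--         1: "coluna_1", 4: "coluna_1", 7: "coluna_1", 10: "coluna_1", 13: "coluna_1", 16: "coluna_1",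
--         19: "coluna_1", 22: "coluna_1", 25: "coluna_1", 28: "coluna_1", 31: "coluna_1", 34: "coluna_1",
--         2: "coluna_2", 5: "coluna_2", 8: "coluna_2", 11: "coluna_2", 14: "coluna_2", 17: "coluna_2",
--         20: "coluna_2", 23: "coluna_2", 26: "coluna_2", 29: "coluna_2", 32: "coluna_2", 35: "coluna_2",
--         3: "coluna_3", 6: "coluna_3", 9: "coluna_3", 12: "coluna_3", 15: "coluna_3", 18: "coluna_3",
--         21: "coluna_3", 24: "coluna_3", 27: "coluna_3", 30: "coluna_3", 33: "coluna_3", 36: "coluna_3"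
--     }
--
--     # Converter números para colunas
--     resultados_colunas = []
--     for numero, _ in resultados:
--         if numero == 0:  # Ignorar o número 0 (verde)
--             continue
--         resultados_colunas.append(colunas[numero])
--
--     # Dividir os resultados em dois grupos: recentes e antigos
--     resultados_antigos = resultados_colunas[limite_tempo:]  # Resultados além do limite de tempo
--     resultados_recentes = resultados_colunas[:limite_tempo]  # Resultados dentro do limite de tempo
--
--     # Calcular repetições antigas
--     repeticoes_antigas = {"coluna_1": 0, "coluna_2": 0, "coluna_3": 0}
--     coluna_atual = None
--     contador = 0
--
--     for col in resultados_antigos: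
--         if col == coluna_atual:
--             contador += 1
--         else:
--             if contador > 1:  # Considerar apenas sequências de 2 ou mais repetições
--                 repeticoes_antigas[coluna_atual] += contador
--             coluna_atual = col
--             contador = 1
--
--     # Verificar a última sequência
--     if contador > 1:
--         repeticoes_antigas[coluna_atual] += contador
--
--     return repeticoes_antigas
-- ===== SOURCE B (Python) =====
-- def _runs(xs):
--     """Decompose xs into maximal runs of equal adjacent elements: [(value, length), ...]."""
--     if not xs:
--         return []
--     c = xs[0]
--     i = 1
--     while i < len(xs) and xs[i] == c:
--         i += 1
--     return [(c, i)] + _runs(xs[i:])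
--
--
-- def calcular_repeticoes_antigas(resultados, limite_tempo=5):
--     colunas = {
--         1: "coluna_1", 4: "coluna_1", 7: "coluna_1", 10: "coluna_1", 13: "coluna_1", 16: "coluna_1",
--         19: "coluna_1", 22: "coluna_1", 25: "coluna_1", 28: "coluna_1", 31: "coluna_1", 34: "coluna_1",
--         2: "coluna_2", 5: "coluna_2", 8: "coluna_2", 11: "coluna_2", 14: "coluna_2", 17: "coluna_2",
--         20: "coluna_2", 23: "coluna_2", 26: "coluna_2", 29: "coluna_2", 32: "coluna_2", 35: "coluna_2",
--         3: "coluna_3", 6: "coluna_3", 9: "coluna_3", 12: "coluna_3", 15: "coluna_3", 18: "coluna_3",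
--         21: "coluna_3", 24: "coluna_3", 27: "coluna_3", 30: "coluna_3", 33: "coluna_3", 36: "coluna_3"
--     }
--     resultados_colunas = [colunas[numero] for numero, _ in resultados if numero != 0]
--     repeticoes_antigas = {"coluna_1": 0, "coluna_2": 0, "coluna_3": 0}
--     for col, n in _runs(resultados_colunas[limite_tempo:]):
--         if n > 1:
--             repeticoes_antigas[col] += n
--     return repeticoes_antigas
-- ===== Notes on version B (the rewrite author's own statement) =====
-- stated objective: alternative
-- what changed: Replaces A's element-by-element run counter (coluna_atual/contador state plus a post-loop flush) with an explicit run-length decomposition: a recursive _runs helper splits the old results into maximal runs (value, length) and a single fold adds each run of length > 1.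
import Mathlib
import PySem

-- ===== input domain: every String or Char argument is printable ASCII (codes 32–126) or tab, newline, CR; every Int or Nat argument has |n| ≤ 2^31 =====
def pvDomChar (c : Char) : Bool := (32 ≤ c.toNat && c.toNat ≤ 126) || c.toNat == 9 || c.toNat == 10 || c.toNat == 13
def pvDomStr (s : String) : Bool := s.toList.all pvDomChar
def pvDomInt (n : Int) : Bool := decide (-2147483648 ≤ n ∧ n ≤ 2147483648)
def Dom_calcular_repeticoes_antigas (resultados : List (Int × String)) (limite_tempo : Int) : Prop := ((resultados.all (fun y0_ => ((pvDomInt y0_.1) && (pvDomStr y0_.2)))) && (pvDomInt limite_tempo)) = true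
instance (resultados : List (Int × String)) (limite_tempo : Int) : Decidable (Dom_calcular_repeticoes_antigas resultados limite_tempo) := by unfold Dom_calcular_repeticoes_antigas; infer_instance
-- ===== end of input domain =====

-- B replaces A's stateful run counter by an explicit run-length decomposition (alternative, same cost).

-- shared literal table: the 'colunas' dict both Pythons write out
def pvColunas : PySem.Dict Int String := PySem.Dict.ofList [
  (1, "coluna_1"), (4, "coluna_1"), (7, "coluna_1"), (10, "coluna_1"), (13, "coluna_1"), (16, "coluna_1"),
  (19, "coluna_1"), (22, "coluna_1"), (25, "coluna_1"), (28, "coluna_1"), (31, "coluna_1"), (34, "coluna_1"),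
  (2, "coluna_2"), (5, "coluna_2"), (8, "coluna_2"), (11, "coluna_2"), (14, "coluna_2"), (17, "coluna_2"),
  (20, "coluna_2"), (23, "coluna_2"), (26, "coluna_2"), (29, "coluna_2"), (32, "coluna_2"), (35, "coluna_2"),
  (3, "coluna_3"), (6, "coluna_3"), (9, "coluna_3"), (12, "coluna_3"), (15, "coluna_3"), (18, "coluna_3"),
  (21, "coluna_3"), (24, "coluna_3"), (27, "coluna_3"), (30, "coluna_3"), (33, "coluna_3"), (36, "coluna_3")]

-- ===== PORT A =====
-- flush: 'repeticoes_antigas[coluna_atual] += contador'; coluna_atual is None only while contador = 0,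
-- so the None branch is unreachable when contador > 1 (Python would raise KeyError there).
def pvFlushA (d : PySem.Dict String Int) (c? : Option String) (k : Int) : PySem.Dict String Int :=
  match c? with
  | some c => d.modify c 0 (· + k)
  | none => d

def calcular_repeticoes_antigas (resultados : List (Int × String)) (limite_tempo : Int) : List (String × Int) :=
  -- 'colunas[numero]' raises KeyError when numero ∉ 1..36 and numero ≠ 0; those inputs are excluded
  -- by Pre_ (the port skips such an element there).
  let resultados_colunas : List String :=
    resultados.foldl (fun acc p =>
      if p.1 == (0 : Int) then acc
      else match pvColunas.get? p.1 with
           | some c => acc ++ [c]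
           | none => acc) []
  let resultados_antigos := PySem.List.slice resultados_colunas (some limite_tempo) none
  let init : PySem.Dict String Int := PySem.Dict.ofList [("coluna_1", 0), ("coluna_2", 0), ("coluna_3", 0)]
  let s := resultados_antigos.foldl (fun s col =>
      if some col == s.2.1 then (s.1, s.2.1, s.2.2 + 1)
      else ((if s.2.2 > 1 then pvFlushA s.1 s.2.1 s.2.2 else s.1), some col, (1 : Int)))
    (init, (none : Option String), (0 : Int))
  (if s.2.2 > 1 then pvFlushA s.1 s.2.1 s.2.2 else s.1).items

-- ===== PORT B =====
-- _runs xs: maximal runs of equal adjacent elements as (value, length); the 'while i < len(xs) and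
-- xs[i] == c' scan is the takeWhile/dropWhile split of xs[1:] at the first element ≠ c (exact).
def pvRunsB : List String → List (String × Int)
  | [] => []
  | c :: xs => (c, 1 + ((xs.takeWhile (· == c)).length : Int)) :: pvRunsB (xs.dropWhile (· == c))
termination_by l => l.length
decreasing_by
  simp only [List.length_cons]
  exact Nat.lt_succ_of_le (List.length_dropWhile_le _ _)

def calcular_repeticoes_antigas_alt (resultados : List (Int × String)) (limite_tempo : Int) : List (String × Int) :=
  let resultados_colunas : List String :=
    resultados.filterMap (fun p => if p.1 == (0 : Int) then none else pvColunas.get? p.1)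
  let rep : PySem.Dict String Int := PySem.Dict.ofList [("coluna_1", 0), ("coluna_2", 0), ("coluna_3", 0)]
  ((pvRunsB (PySem.List.slice resultados_colunas (some limite_tempo) none)).foldl
      (fun d cn => if cn.2 > 1 then d.modify cn.1 0 (· + cn.2) else d) rep).items

-- ===== PRECONDITION & SPEC =====
-- Pre_ excludes exactly the inputs where A raises KeyError: a nonzero number outside 1..36.
def Pre_calcular_repeticoes_antigas (resultados : List (Int × String)) (limite_tempo : Int) : Prop :=
  ∀ p ∈ resultados, p.1 = 0 ∨ (1 ≤ p.1 ∧ p.1 ≤ 36)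
instance (resultados : List (Int × String)) (limite_tempo : Int) : Decidable (Pre_calcular_repeticoes_antigas resultados limite_tempo) := by unfold Pre_calcular_repeticoes_antigas; infer_instance

def pvWitness_calcular_repeticoes_antigas : (List (Int × String)) × Int :=
  ([(1, "red"), (1, "red"), (0, "green"), (4, "black")], 1)

def Spec_calcular_repeticoes_antigas (resultados : List (Int × String)) (limite_tempo : Int) (out : List (String × Int)) : Prop := out = calcular_repeticoes_antigas_alt resultados limite_tempo
instance (resultados : List (Int × String)) (limite_tempo : Int) (out : List (String × Int)) : Decidable (Spec_calcular_repeticoes_antigas resultados limite_tempo out) := by unfold Spec_calcular_repeticoes_antigas; infer_instance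

-- ===== CLAIM (what is proved, stated in full; the proofs are below) =====
def Claim_equal_calcular_repeticoes_antigas : Prop := ∀ (resultados : List (Int × String)) (limite_tempo : Int), Dom_calcular_repeticoes_antigas resultados limite_tempo → Pre_calcular_repeticoes_antigas resultados limite_tempo → Spec_calcular_repeticoes_antigas resultados limite_tempo (calcular_repeticoes_antigas resultados limite_tempo)

-- ===== LEMMAS AND PROOFS =====

-- the conversion loops produce the same column list
theorem pvCols_eq (l : List (Int × String)) (acc : List String) :
    l.foldl (fun acc p =>
      if p.1 == (0 : Int) then acc
      else match pvColunas.get? p.1 with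
           | some c => acc ++ [c]
           | none => acc) acc
    = acc ++ l.filterMap (fun p => if p.1 == (0 : Int) then none else pvColunas.get? p.1) := by
  induction l generalizing acc with
  | nil => simp
  | cons p t ih =>
    by_cases h : p.1 = 0
    · rw [List.foldl_cons, ih]
      simp [h]
    · cases hc : pvColunas.get? p.1 with
      | none =>
        rw [List.foldl_cons, ih]
        simp [h, hc]
      | some c =>
        rw [List.foldl_cons, ih]
        simp [h, hc]

-- proof-side abbreviations for the two loop bodies and A's flush
def pvStepA (s : PySem.Dict String Int × Option String × Int) (col : String) :
    PySem.Dict String Int × Option String × Int :=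
  if some col == s.2.1 then (s.1, s.2.1, s.2.2 + 1)
  else ((if s.2.2 > 1 then pvFlushA s.1 s.2.1 s.2.2 else s.1), some col, (1 : Int))

def pvFlush2 (s : PySem.Dict String Int × Option String × Int) : PySem.Dict String Int :=
  if s.2.2 > 1 then pvFlushA s.1 s.2.1 s.2.2 else s.1

def pvStepB (d : PySem.Dict String Int) (cn : String × Int) : PySem.Dict String Int :=
  if cn.2 > 1 then d.modify cn.1 0 (· + cn.2) else d

-- main invariant: A's flushed loop from state (d, some c, k) equals B's fold over the run
-- decomposition that starts with the open run (c, k + matching prefix)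
theorem pvMain (l : List String) (d : PySem.Dict String Int) (c : String) (k : Int) :
    pvFlush2 (l.foldl pvStepA (d, some c, k))
    = ((c, k + ((l.takeWhile (· == c)).length : Int)) :: pvRunsB (l.dropWhile (· == c))).foldl pvStepB d := by
  induction l generalizing d c k with
  | nil => simp [pvFlush2, pvRunsB, pvStepB, pvFlushA]
  | cons x xs ih =>
    rw [List.foldl_cons]
    by_cases hx : x = c
    · subst hx
      have hs : pvStepA (d, some x, k) x = (d, some x, k + 1) := by simp [pvStepA]
      rw [hs, ih]
      have ht : (x :: xs).takeWhile (· == x) = x :: xs.takeWhile (· == x) := by simp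
      have hd2 : (x :: xs).dropWhile (· == x) = xs.dropWhile (· == x) := by simp
      rw [ht, hd2]
      simp only [List.length_cons]
      have harith : k + 1 + ((xs.takeWhile (· == x)).length : Int)
          = k + (((xs.takeWhile (· == x)).length : Int) + 1) := by ring
      push_cast
      rw [harith]
    · have hb : (some x == some c) = false := by simp [hx]
      have hs : pvStepA (d, some c, k) x = (pvFlush2 (d, some c, k), some x, 1) := by
        simp [pvStepA, pvFlush2, hb]
      rw [hs, ih]
      have ht : (x :: xs).takeWhile (· == c) = [] := by simp [hx]
      have hd2 : (x :: xs).dropWhile (· == c) = x :: xs := by simp [hx]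
      rw [ht, hd2]
      simp only [pvRunsB, List.foldl_cons, List.length_nil]
      have hfb : pvStepB d (c, k + ((0 : Nat) : Int)) = pvFlush2 (d, some c, k) := by
        simp [pvStepB, pvFlush2, pvFlushA]
      rw [hfb]

-- ===== VERDICT (by name: the statement is the Claim_ definition above) =====
theorem calcular_repeticoes_antigas_spec : Claim_equal_calcular_repeticoes_antigas := by
  intro resultados limite_tempo _ _
  show calcular_repeticoes_antigas resultados limite_tempo
      = calcular_repeticoes_antigas_alt resultados limite_tempo
  simp only [calcular_repeticoes_antigas, calcular_repeticoes_antigas_alt]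
  rw [pvCols_eq]
  simp only [List.nil_append]
  show (pvFlush2 ((PySem.List.slice
      (resultados.filterMap (fun p => if p.1 == (0 : Int) then none else pvColunas.get? p.1))
      (some limite_tempo) none).foldl pvStepA
      (PySem.Dict.ofList [("coluna_1", 0), ("coluna_2", 0), ("coluna_3", 0)],
        (none : Option String), (0 : Int)))).items
    = ((pvRunsB (PySem.List.slice
      (resultados.filterMap (fun p => if p.1 == (0 : Int) then none else pvColunas.get? p.1))
      (some limite_tempo) none)).foldl pvStepB
        (PySem.Dict.ofList [("coluna_1", 0), ("coluna_2", 0), ("coluna_3", 0)])).items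
  cases hant : PySem.List.slice
      (resultados.filterMap (fun p => if p.1 == (0 : Int) then none else pvColunas.get? p.1))
      (some limite_tempo) none with
  | nil => simp [pvFlush2, pvRunsB]
  | cons x xs =>
    rw [List.foldl_cons]
    have hs : pvStepA (PySem.Dict.ofList [("coluna_1", 0), ("coluna_2", 0), ("coluna_3", 0)],
        (none : Option String), (0 : Int)) x
        = (PySem.Dict.ofList [("coluna_1", 0), ("coluna_2", 0), ("coluna_3", 0)], some x, (1 : Int)) := by
      simp [pvStepA]
    rw [hs, pvMain]
    simp only [pvRunsB]
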